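-- pv_equiv track=rewrite | github.com/Baekhyungjin/newproject | src/api.py | suggest_verses
-- ===== SOURCE A (Python) =====
-- from typing import Any
--
-- def suggest_verses(
--     verses: list[dict[str, Any]], query: str, limit: int = 3
-- ) -> list[dict[str, Any]]:
--     tokens = {token for token in query.strip().split() if token}
--
--     def score(verse: dict[str, Any]) -> int:
--         verse_text = f"{verse['reference']} {verse['text']}"
--         return sum(1 for token in tokens if token in verse_text)
--
--     ranked = sorted(verses, key=score, reverse=True)
--     return [verse for verse in ranked if score(verse) > 0][:limit]
-- ===== SOURCE B (Python) =====
-- def suggest_verses(verses, query, limit=3):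
--     tokens = {token for token in query.strip().split() if token}
--     buckets = {}
--     best = 0
--     for verse in verses:
--         verse_text = f"{verse['reference']} {verse['text']}"
--         hits = sum(1 for token in tokens if token in verse_text)
--         if hits > 0:
--             buckets.setdefault(hits, []).append(verse)
--             if hits > best:
--                 best = hits
--     result = []
--     for s in range(best, 0, -1):
--         result.extend(buckets.get(s, []))
--     return result[:limit]
-- ===== Notes on version B (the rewrite author's own statement) =====
-- stated objective: alternative
-- what changed: B replaces A's comparison sort entirely with a counting/bucket sort: one pass scores each verse once into score-keyed buckets (a dict of lists) while tracking the maximum score, then concatenates buckets from the highest score down to 1 (skipping score 0) and slices to limit; bucket insertion order reproduces the stable reverse sort's tie order.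
import Mathlib
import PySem

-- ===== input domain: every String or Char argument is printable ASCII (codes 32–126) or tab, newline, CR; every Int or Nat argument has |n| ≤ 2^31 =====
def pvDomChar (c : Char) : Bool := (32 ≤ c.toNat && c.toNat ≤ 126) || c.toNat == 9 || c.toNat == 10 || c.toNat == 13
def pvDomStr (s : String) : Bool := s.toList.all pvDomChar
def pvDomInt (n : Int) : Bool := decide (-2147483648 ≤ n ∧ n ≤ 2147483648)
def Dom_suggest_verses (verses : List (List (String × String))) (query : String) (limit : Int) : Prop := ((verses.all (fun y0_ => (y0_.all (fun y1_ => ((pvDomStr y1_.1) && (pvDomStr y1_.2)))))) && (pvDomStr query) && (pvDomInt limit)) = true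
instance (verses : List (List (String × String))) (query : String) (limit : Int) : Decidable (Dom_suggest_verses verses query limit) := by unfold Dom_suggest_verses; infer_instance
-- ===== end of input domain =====

-- B replaces A's comparison sort with a counting/bucket sort (score-keyed buckets emitted from the highest score down); equivalence of the returned list is proved; neither program mutates its arguments.
-- ===== PORT A =====
-- shared helper: the token set and the score computation are textually identical in Source A and Source B
def pvTokens (query : String) : List String :=
  PySem.Set.ofList ((PySem.Str.split₀ (PySem.Str.strip query)).filter (fun t => t ≠ ""))

-- f"{verse['reference']} {verse['text']}" ported by hand as list-of-chars concatenation (exact: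
-- plain string concatenation); dict lookups use Dict.ofList/get? — Python raises KeyError on a
-- missing key, which Pre_ excludes, so the .getD "" default is never reached inside Pre_.
def pvScore (query : String) (verse : List (String × String)) : Int :=
  let vtext : String := String.ofList
    ((((PySem.Dict.ofList verse).get? "reference").getD "").toList ++
      ' ' :: (((PySem.Dict.ofList verse).get? "text").getD "").toList)
  (pvTokens query).foldl (fun acc t => if PySem.Str.isIn t vtext then acc + 1 else acc) 0

def suggest_verses (verses : List (List (String × String))) (query : String) (limit : Int) : List (List (String × String)) :=
  let score := pvScore query
  let ranked := PySem.List.sorted verses score true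
  PySem.List.slice (ranked.filter (fun v => decide (score v > 0))) none (some limit)

-- ===== PORT B =====
-- the body of Source B's per-verse loop: score once; positive scores go into the score-keyed bucket
-- dict (appended, so original order is kept inside a bucket) while the running maximum is updated
def pvBStep (query : String)
    (st : PySem.Dict Int (List (List (String × String))) × Int)
    (verse : List (String × String)) :
    PySem.Dict Int (List (List (String × String))) × Int :=
  let hits := pvScore query verse
  if hits > 0 then
    (st.1.modify hits [] (fun l => l ++ [verse]), if hits > st.2 then hits else st.2)
  else st

def suggest_verses_alt (verses : List (List (String × String))) (query : String) (limit : Int) : List (List (String × String)) :=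
  let st := verses.foldl (pvBStep query) ((PySem.Dict.empty : PySem.Dict Int (List (List (String × String)))), 0)
  let result := (PySem.List.pyRange st.2 0 (-1)).foldl (fun acc s => acc ++ st.1.getD s []) []
  PySem.List.slice result none (some limit)

-- ===== PRECONDITION & SPEC =====
-- Pre_ excludes exactly the verses missing the 'reference' or 'text' key, on which Python A raises KeyError.
def Pre_suggest_verses (verses : List (List (String × String))) (_query : String) (_limit : Int) : Prop :=
  (verses.all (fun v => (PySem.Dict.ofList v).contains "reference" && (PySem.Dict.ofList v).contains "text")) = true
instance (verses : List (List (String × String))) (query : String) (limit : Int) : Decidable (Pre_suggest_verses verses query limit) := by unfold Pre_suggest_verses; infer_instance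

def pvWitness_suggest_verses : (List (List (String × String))) × String × Int :=
  ([[("reference", "Gen 1:1"), ("text", "In the beginning")], [("reference", "Jn 3:16"), ("text", "For God so loved")]], "the beginning", 3)

def Spec_suggest_verses (verses : List (List (String × String))) (query : String) (limit : Int) (out : List (List (String × String))) : Prop := out = suggest_verses_alt verses query limit
instance (verses : List (List (String × String))) (query : String) (limit : Int) (out : List (List (String × String))) : Decidable (Spec_suggest_verses verses query limit out) := by unfold Spec_suggest_verses; infer_instance

-- ===== CLAIM (what is proved, stated in full; the proofs are below) =====
def Claim_equal_suggest_verses : Prop := ∀ (verses : List (List (String × String))) (query : String) (limit : Int), Dom_suggest_verses verses query limit → Pre_suggest_verses verses query limit → Spec_suggest_verses verses query limit (suggest_verses verses query limit)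

-- ===== LEMMAS AND PROOFS =====

-- the canonical bucket concatenation: blocks for scores n, n-1, ..., 1, each in original order
def pvF {α : Type} (k : α → Int) : Nat → List α → List α
  | 0, _ => []
  | n+1, zs => zs.filter (fun v => decide (k v = (n : Int) + 1)) ++ pvF k n zs

theorem pvF_nil {α : Type} (k : α → Int) (n : Nat) : pvF k n [] = [] := by
  induction n with
  | zero => rfl
  | succ n ih => simp [pvF, ih]

theorem mem_pvF {α : Type} (k : α → Int) (n : Nat) (zs : List α) (y : α)
    (hy : y ∈ pvF k n zs) : y ∈ zs ∧ 1 ≤ k y ∧ k y ≤ (n : Int) := by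
  induction n with
  | zero => simp [pvF] at hy
  | succ n ih =>
      simp only [pvF, List.mem_append] at hy
      rcases hy with hy | hy
      · rcases List.mem_filter.mp hy with ⟨hz, hk⟩
        simp at hk
        refine ⟨hz, by omega, by push_cast; omega⟩
      · rcases ih hy with ⟨hz, h1, h2⟩
        exact ⟨hz, h1, by push_cast; omega⟩

theorem pvF_append_gt {α : Type} (k : α → Int) (n : Nat) (zs : List α) (x : α)
    (h : (n : Int) < k x) : pvF k n (zs ++ [x]) = pvF k n zs := by
  induction n with
  | zero => rfl
  | succ n ih =>
      have hx : ¬ (k x = (n : Int) + 1) := by push_cast at h; omega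
      simp only [pvF, List.filter_append]
      rw [ih (by push_cast at h ⊢; omega)]
      simp [hx]

theorem pv_insertBy_skip {α : Type} (b : α → α → Bool) (x : α) (as bs : List α)
    (h : ∀ y ∈ as, b x y = false) :
    PySem.List.insertBy b x (as ++ bs) = as ++ PySem.List.insertBy b x bs := by
  induction as with
  | nil => rfl
  | cons a as ih =>
      simp only [List.cons_append, PySem.List.insertBy, h a (List.mem_cons_self ..),
        Bool.false_eq_true, if_false]
      rw [ih (fun y hy => h y (List.mem_cons_of_mem _ hy))]

theorem pv_insertBy_front {α : Type} (b : α → α → Bool) (x : α) (bs : List α)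
    (h : ∀ y ∈ bs, b x y = true) :
    PySem.List.insertBy b x bs = x :: bs := by
  cases bs with
  | nil => rfl
  | cons c cs => simp [PySem.List.insertBy, h c (List.mem_cons_self ..)]

theorem pvF_insert {α : Type} (k : α → Int) (n : Nat) (zs : List α) (x : α)
    (h1 : 1 ≤ k x) (h2 : k x ≤ (n : Int)) :
    PySem.List.insertBy (fun a c => decide (k c < k a)) x (pvF k n zs) = pvF k n (zs ++ [x]) := by
  induction n with
  | zero => exact absurd h2 (by push_cast; omega)
  | succ n ih =>
      simp only [pvF]
      by_cases hx : k x = (n : Int) + 1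
      · rw [pv_insertBy_skip _ _ _ _ (by
            intro y hy
            rcases List.mem_filter.mp hy with ⟨_, hk⟩
            simp at hk ⊢
            omega)]
        rw [pv_insertBy_front _ _ _ (by
            intro y hy
            rcases mem_pvF k n zs y hy with ⟨_, _, hle⟩
            simp
            omega)]
        rw [List.filter_append, pvF_append_gt k n zs x (by omega)]
        simp [hx]
      · have hx' : k x ≤ (n : Int) := by push_cast at h2; omega
        rw [pv_insertBy_skip _ _ _ _ (by
            intro y hy
            rcases List.mem_filter.mp hy with ⟨_, hk⟩
            simp at hk ⊢
            omega)]
        rw [ih hx', List.filter_append]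
        have : ¬ (k x = (n : Int) + 1) := hx
        simp [this]

theorem pvF_foldl {α : Type} (k : α → Int) (n : Nat) (ys : List α)
    (h : ∀ y ∈ ys, 1 ≤ k y ∧ k y ≤ (n : Int)) (zs : List α) :
    ys.foldl (fun acc x => PySem.List.insertBy (fun a c => decide (k c < k a)) x acc) (pvF k n zs)
      = pvF k n (zs ++ ys) := by
  induction ys generalizing zs with
  | nil => simp
  | cons x ys ih =>
      simp only [List.foldl]
      rcases h x (List.mem_cons_self ..) with ⟨h1, h2⟩
      rw [pvF_insert k n zs x h1 h2, ih (fun y hy => h y (List.mem_cons_of_mem _ hy)) (zs ++ [x])]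
      simp

-- insertBy (descending comparison) preserves the descending Pairwise invariant
theorem pv_insertBy_pairwise {α : Type} (k : α → Int) (x : α) (ys : List α)
    (hp : ys.Pairwise (fun a c => k c ≤ k a)) :
    (PySem.List.insertBy (fun a c => decide (k c < k a)) x ys).Pairwise (fun a c => k c ≤ k a) := by
  induction ys with
  | nil => simp [PySem.List.insertBy]
  | cons y ys ih =>
      rcases List.pairwise_cons.mp hp with ⟨hy, hys⟩
      simp only [PySem.List.insertBy]
      by_cases hb : k y < k x
      · rw [if_pos (decide_eq_true hb)]
        refine List.pairwise_cons.mpr ⟨?_, hp⟩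
        intro z hz
        rcases List.mem_cons.mp hz with hz | hz
        · subst hz; omega
        · have := hy z hz; omega
      · rw [if_neg (by simpa using hb)]
        refine List.pairwise_cons.mpr ⟨?_, ih hys⟩
        intro z hz
        rcases (PySem.List.mem_insertBy _ _ _ _).mp hz with hz | hz
        · subst hz; omega
        · exact hy z hz

-- filtering by (0 < key) commutes with a single descending insertion, on a descending list
theorem pv_filter_insertBy {α : Type} (k : α → Int) (x : α) (ys : List α)
    (hp : ys.Pairwise (fun a c => k c ≤ k a)) :
    (PySem.List.insertBy (fun a c => decide (k c < k a)) x ys).filter (fun v => decide (k v > 0)) =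
      if k x > 0 then
        PySem.List.insertBy (fun a c => decide (k c < k a)) x (ys.filter (fun v => decide (k v > 0)))
      else ys.filter (fun v => decide (k v > 0)) := by
  induction ys with
  | nil =>
      simp only [PySem.List.insertBy, List.filter]
      by_cases hx : k x > 0 <;> simp [hx]
  | cons y ys ih =>
      rcases List.pairwise_cons.mp hp with ⟨hy, hys⟩
      simp only [PySem.List.insertBy]
      by_cases hb : k y < k x
      · rw [if_pos (decide_eq_true hb)]
        by_cases hx : k x > 0
        · by_cases hpy : k y > 0
          · simp [List.filter, hx, hpy, PySem.List.insertBy, hb]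
          · have hnil : (y :: ys).filter (fun v => decide (k v > 0)) = [] := by
              rw [List.filter_eq_nil_iff]
              intro z hz
              rcases List.mem_cons.mp hz with hz | hz
              · subst hz; simpa using hpy
              · have := hy z hz; simp; omega
            rw [if_pos hx, List.filter_cons_of_pos (by simpa using hx), hnil]
            simp [PySem.List.insertBy]
        · have hpy : ¬ k y > 0 := by omega
          simp [List.filter, hx, hpy]
      · rw [if_neg (by simpa using hb)]
        by_cases hpy : k y > 0
        · rw [List.filter_cons_of_pos (by simpa using hpy), ih hys,
              List.filter_cons_of_pos (by simpa using hpy)]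
          by_cases hx : k x > 0
          · rw [if_pos hx, if_pos hx]
            simp only [PySem.List.insertBy]
            rw [if_neg (by simpa using hb)]
          · rw [if_neg hx, if_neg hx]
        · have hx : ¬ k x > 0 := by omega
          rw [List.filter_cons_of_neg (by simpa using hpy), ih hys,
              List.filter_cons_of_neg (by simpa using hpy)]

theorem pv_filter_foldl_insertBy {α : Type} (k : α → Int) (xs zs : List α)
    (hp : zs.Pairwise (fun a c => k c ≤ k a)) :
    (xs.foldl (fun acc x => PySem.List.insertBy (fun a c => decide (k c < k a)) x acc) zs).filter
        (fun v => decide (k v > 0)) =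
      (xs.filter (fun v => decide (k v > 0))).foldl
        (fun acc x => PySem.List.insertBy (fun a c => decide (k c < k a)) x acc)
        (zs.filter (fun v => decide (k v > 0))) := by
  induction xs generalizing zs with
  | nil => rfl
  | cons x xs ih =>
      simp only [List.foldl]
      rw [ih _ (pv_insertBy_pairwise k x zs hp), pv_filter_insertBy k x zs hp]
      by_cases hx : k x > 0
      · rw [List.filter_cons_of_pos (by simpa using hx)]
        simp [if_pos hx]
      · rw [List.filter_cons_of_neg (by simpa using hx)]
        simp [if_neg hx]

-- the running-maximum fold
theorem pv_maxfold_le {α : Type} (k : α → Int) (vs : List α) (b : Int) :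
    b ≤ vs.foldl (fun m v => max m (k v)) b := by
  induction vs generalizing b with
  | nil => simp
  | cons v vs ih => exact le_trans (le_max_left _ _) (ih (max b (k v)))

theorem pv_maxfold_mem {α : Type} (k : α → Int) (vs : List α) :
    ∀ (b : Int) (v : α), v ∈ vs → k v ≤ vs.foldl (fun m v => max m (k v)) b := by
  induction vs with
  | nil => intro b v hv; simp at hv
  | cons w ws ih =>
      intro b v hv
      rcases List.mem_cons.mp hv with hv | hv
      · subst hv
        exact le_trans (le_max_right _ _) (pv_maxfold_le k ws (max b (k v)))
      · exact ih (max b (k w)) v hv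

-- B's bucket fold: the second component is the running maximum of the positive scores
theorem pv_bfold_best (query : String) (vs : List (List (String × String)))
    (d : PySem.Dict Int (List (List (String × String)))) (b : Int) (hb : 0 ≤ b) :
    (vs.foldl (pvBStep query) (d, b)).2 = vs.foldl (fun m v => max m (pvScore query v)) b := by
  induction vs generalizing d b with
  | nil => rfl
  | cons v vs ih =>
      simp only [List.foldl]
      by_cases hv : pvScore query v > 0
      · have hstep : pvBStep query (d, b) v =
            (d.modify (pvScore query v) [] (fun l => l ++ [v]),
              if pvScore query v > b then pvScore query v else b) := by
          simp [pvBStep, hv]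
        rw [hstep, ih _ _ (by split_ifs <;> omega)]
        have : (if pvScore query v > b then pvScore query v else b) = max b (pvScore query v) := by
          split_ifs <;> omega
        rw [this]
      · have hstep : pvBStep query (d, b) v = (d, b) := by simp [pvBStep, hv]
        rw [hstep, ih _ _ hb]
        have : max b (pvScore query v) = b := by omega
        rw [this]

-- B's bucket fold: bucket s (s ≥ 1) holds exactly the verses of score s, in original order
theorem pv_bfold_bucket (query : String) (vs : List (List (String × String)))
    (d : PySem.Dict Int (List (List (String × String)))) (b : Int) (s : Int) (hs : 1 ≤ s) :
    ((vs.foldl (pvBStep query) (d, b)).1).getD s [] =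
      d.getD s [] ++ vs.filter (fun v => decide (pvScore query v = s)) := by
  induction vs generalizing d b with
  | nil => simp
  | cons v vs ih =>
      simp only [List.foldl]
      by_cases hv : pvScore query v > 0
      · have hstep : pvBStep query (d, b) v =
            (d.modify (pvScore query v) [] (fun l => l ++ [v]),
              if pvScore query v > b then pvScore query v else b) := by
          simp [pvBStep, hv]
        rw [hstep, ih _ _]
        rw [PySem.Dict.getD_modify]
        by_cases hsv : s = pvScore query v
        · rw [if_pos hsv, List.filter_cons_of_pos (by simp; omega)]
          simp [hsv]
        · rw [if_neg hsv, List.filter_cons_of_neg (by simp; omega)]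
      · have hstep : pvBStep query (d, b) v = (d, b) := by simp [pvBStep, hv]
        rw [hstep, ih _ _, List.filter_cons_of_neg (by simp; omega)]

-- emitting the buckets from score n down to 1 is exactly pvF
theorem pv_range_flat {α : Type} (k : α → Int) (n : Nat) (vs : List α) :
    (PySem.List.pyRange (n : Int) 0 (-1)).flatMap
        (fun s => vs.filter (fun v => decide (k v = s))) = pvF k n vs := by
  induction n with
  | zero => simp [PySem.List.pyRange_neg_one_eq_nil (le_refl 0), pvF]
  | succ n ih =>
      rw [PySem.List.pyRange_neg_one_cons (by push_cast; omega)]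
      simp only [List.flatMap_cons]
      have h1 : ((n + 1 : Nat) : Int) - 1 = (n : Int) := by push_cast; omega
      rw [h1, ih]
      simp only [pvF]
      have h2 : ((n + 1 : Nat) : Int) = (n : Int) + 1 := by push_cast; omega
      rw [h2]

-- pvF ignores the zero-score verses, so filtering them first changes nothing
theorem pvF_filter_pos {α : Type} (k : α → Int) (n : Nat) (vs : List α) :
    pvF k n (vs.filter (fun v => decide (k v > 0))) = pvF k n vs := by
  induction n with
  | zero => rfl
  | succ n ih =>
      simp only [pvF, ih, List.filter_filter]
      congr 1
      apply List.filter_congr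
      intro v _
      by_cases h : k v = (n : Int) + 1 <;> simp [h]

-- ===== VERDICT (by name: the statement is the Claim_ definition above) =====
theorem suggest_verses_spec : Claim_equal_suggest_verses := by
  intro verses query limit _ _
  unfold Spec_suggest_verses suggest_verses suggest_verses_alt
  simp only []
  set k := pvScore query with hk
  set N : Int := verses.foldl (fun m v => max m (k v)) 0 with hN
  have hN0 : 0 ≤ N := pv_maxfold_le k verses 0
  have hNn : ((N.toNat : Nat) : Int) = N := Int.toNat_of_nonneg hN0
  -- A side equals pvF
  have hA : (PySem.List.sorted verses k true).filter (fun v => decide (k v > 0)) =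
      pvF k N.toNat verses := by
    rw [PySem.List.sorted_rev_eq_foldl_insertBy,
        pv_filter_foldl_insertBy k verses [] List.Pairwise.nil, List.filter_nil,
        show ([] : List (List (String × String))) = pvF k N.toNat [] from (pvF_nil k N.toNat).symm,
        pvF_foldl k N.toNat _ ?_ []]
    · rw [List.nil_append, pvF_filter_pos]
    · intro y hy
      rcases List.mem_filter.mp hy with ⟨hmem, hpos⟩
      simp at hpos
      exact ⟨by omega, by rw [hNn]; exact pv_maxfold_mem k verses 0 y hmem⟩
  -- B side equals pvF
  have hbest : (verses.foldl (pvBStep query) (PySem.Dict.empty, 0)).2 = N :=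
    pv_bfold_best query verses PySem.Dict.empty 0 (le_refl 0)
  have hB : (PySem.List.pyRange (verses.foldl (pvBStep query) (PySem.Dict.empty, 0)).2 0 (-1)).foldl
      (fun acc s => acc ++ ((verses.foldl (pvBStep query) (PySem.Dict.empty, 0)).1).getD s []) []
        = pvF k N.toNat verses := by
    rw [hbest]
    have hcong := PySem.List.foldl_congr_mem (PySem.List.pyRange N 0 (-1))
      (fun acc s => acc ++ ((verses.foldl (pvBStep query) (PySem.Dict.empty, 0)).1).getD s [])
      (fun acc s => acc ++ verses.filter (fun v => decide (k v = s)))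
      ([] : List (List (String × String)))
      (by
        intro acc s hsmem
        rcases (PySem.List.mem_pyRange_neg_one).mp hsmem with ⟨hs1, _⟩
        dsimp only
        rw [pv_bfold_bucket query verses PySem.Dict.empty 0 s (by omega), PySem.Dict.getD_empty,
            List.nil_append])
    rw [hcong, PySem.List.foldl_append_eq_flatMap, List.nil_append]
    conv_lhs => rw [← hNn]
    exact pv_range_flat k N.toNat verses
  rw [hA, hB]
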